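-- pv_equiv track=rewrite | github.com/openrepublic/py-leap | src/leap/protocol/ds.py | string_to_name
-- ===== SOURCE A (Python) =====
-- def char_to_symbol(c):
--     if c >= ord('a') and c <= ord('z'):
--         return (c - ord('a')) + 6
--     if c >= ord('1') and c <= ord('5'):
--         return (c - ord('1')) + 1
--     return 0
--
-- def string_to_name(s):
--     if len(s) > 13: raise Exception("invalid string length")
--     name = 0
--     i = 0
--     while i < min(len(s), 12):
--         name |= (char_to_symbol(ord(s[i])) & 0x1f) << (64 - 5 * (i + 1))
--         i += 1
--     if len(s) == 13:
--         name |= char_to_symbol(ord(s[12])) & 0x0F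
--     return name
-- ===== SOURCE B (Python) =====
-- CHARMAP = ".12345abcdefghijklmnopqrstuvwxyz"
-- BASE32 = "0123456789abcdefghijklmnopqrstuv"
--
-- def _symbol(c):
--     return CHARMAP.index(c) if c in CHARMAP else 0
--
-- def string_to_name(s):
--     if len(s) > 13: raise Exception("invalid string length")
--     body = (s[:12] + "." * 12)[:12]
--     digits = "".join(BASE32[_symbol(c)] for c in body)
--     name = int(digits, 32) << 4
--     if len(s) == 13:
--         name |= _symbol(s[12]) & 0x0F
--     return name
-- ===== Notes on version B (the rewrite author's own statement) =====
-- stated objective: alternative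
-- what changed: Replaces A's bit-positional packing loop (range-arithmetic char_to_symbol, 5-bit fields ORed at offsets 64-5*(i+1)) with a table-driven pipeline: pad the string to 12 slots with the zero-symbol character, translate each character via a lookup-table index into a base-32 digit string, parse it with int(digits, 32) and shift by 4, OR-ing in the table value of the 13th character if present.
import Mathlib
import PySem

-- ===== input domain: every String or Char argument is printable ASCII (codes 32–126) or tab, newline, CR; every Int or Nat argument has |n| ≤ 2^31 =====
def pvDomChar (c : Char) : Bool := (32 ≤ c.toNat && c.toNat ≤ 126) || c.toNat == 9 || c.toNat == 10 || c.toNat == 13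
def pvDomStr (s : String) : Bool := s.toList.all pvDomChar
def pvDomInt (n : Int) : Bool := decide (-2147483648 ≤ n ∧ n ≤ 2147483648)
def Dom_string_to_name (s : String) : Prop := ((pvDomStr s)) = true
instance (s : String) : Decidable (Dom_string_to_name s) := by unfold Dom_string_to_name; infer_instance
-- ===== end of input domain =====

-- B replaces A's bit-positional OR loop (char_to_symbol range arithmetic, 5-bit fields ORed
-- at offsets 64-5*(i+1)) by a table-driven pipeline: pad the string to 12 slots with the
-- zero-symbol character, translate each character through a symbol lookup table into a
-- base-32 digit string, parse that string as a base-32 integer and shift it into place;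
-- objective: alternative.
-- Both A and B raise on len(s) > 13; Pre_ excludes exactly those inputs.

-- ===== PORT A =====
def char_to_symbol (c : Int) : Int :=
  if 97 ≤ c ∧ c ≤ 122 then (c - 97) + 6
  else if 49 ≤ c ∧ c ≤ 53 then (c - 49) + 1
  else 0

-- A's while-loop; s[i] is always in range (i < min(len,12)), so getD is exact here
def stnLoopA (cs : List Char) (stop i : Nat) (name : Int) : Int :=
  if i < stop then
    stnLoopA cs stop (i + 1)
      (Int.lor name (Int.shiftLeft (Int.land (char_to_symbol ((cs.getD i ' ').toNat)) 31) (64 - 5 * (i + 1))))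
  else name
termination_by stop - i

def string_to_name (s : String) : Int :=
  let cs := s.toList
  let name := stnLoopA cs (min cs.length 12) 0 0
  if cs.length = 13 then Int.lor name (Int.land (char_to_symbol ((cs.getD 12 ' ').toNat)) 15)
  else name

-- ===== PORT B =====
def pvCHARMAP : List Char := ".12345abcdefghijklmnopqrstuvwxyz".toList
def pvBASE32 : List Char := "0123456789abcdefghijklmnopqrstuv".toList

-- _symbol(c) = CHARMAP.index(c) if c in CHARMAP else 0 (a Nat: it is used as a list index)
def pvSymbol (c : Char) : Nat :=
  if c ∈ pvCHARMAP then (PySem.List.index? pvCHARMAP c).getD 0 else 0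

def string_to_name_alt (s : String) : Int :=
  let cs := s.toList
  -- body = (s[:12] + "." * 12)[:12]  (nonnegative slice bounds: take is exact)
  let body := (cs.take 12 ++ List.replicate 12 '.').take 12
  -- digits = "".join(BASE32[_symbol(c)] for c in body); _symbol c < 32 so getD is exact
  let digits := body.map (fun c => pvBASE32.getD (pvSymbol c) '0')
  -- int(digits, 32): base-32 parse, digit value = index in BASE32 (exact: every produced digit is in BASE32)
  let name := Int.shiftLeft
    (digits.foldl (fun a c => a * 32 + (((PySem.List.index? pvBASE32 c).getD 0 : Nat) : Int)) 0) 4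
  if cs.length = 13 then
    Int.lor name (Int.land ((pvSymbol (cs.getD 12 ' ') : Nat) : Int) 15)
  else name

-- ===== PRECONDITION & SPEC =====
-- excluded: strings longer than 13 characters, on which both A and B raise.
def Pre_string_to_name (s : String) : Prop := s.toList.length ≤ 13
instance (s : String) : Decidable (Pre_string_to_name s) := by unfold Pre_string_to_name; infer_instance
def pvWitness_string_to_name : String := "eosio.token"

def Spec_string_to_name (s : String) (out : Int) : Prop := out = string_to_name_alt s
instance (s : String) (out : Int) : Decidable (Spec_string_to_name s out) := by unfold Spec_string_to_name; infer_instance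

-- ===== CLAIM (what is proved, stated in full; the proofs are below) =====
def Claim_equal_string_to_name : Prop :=
  ∀ (s : String), Dom_string_to_name s → Pre_string_to_name s → Spec_string_to_name s (string_to_name s)

-- ===== LEMMAS AND PROOFS =====

-- Nat-level symbol of a character, and the padded 5-bit digit of slot i
def symC (c : Char) : Nat :=
  if 97 ≤ c.toNat ∧ c.toNat ≤ 122 then (c.toNat - 97) + 6
  else if 49 ≤ c.toNat ∧ c.toNat ≤ 53 then (c.toNat - 49) + 1
  else 0

def pad (cs : List Char) (i : Nat) : Nat := if i < cs.length then symC (cs.getD i ' ') else 0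

-- base-32 accumulator after k slots
def bAcc (cs : List Char) (k : Nat) : Nat := (List.range k).foldl (fun a i => a * 32 + pad cs i) 0

theorem symC_eq (c : Char) : char_to_symbol ((c.toNat : Int)) = ((symC c : Nat) : Int) := by
  unfold char_to_symbol symC
  split_ifs <;> push_cast at * <;> omega

theorem symC_lt (c : Char) : symC c < 32 := by
  unfold symC; split_ifs <;> omega

theorem pad_lt (cs : List Char) (i : Nat) : pad cs i < 32 := by
  unfold pad; split_ifs; · exact symC_lt _
  · omega

theorem bAcc_succ (cs : List Char) (k : Nat) :
    bAcc cs (k + 1) = bAcc cs k * 32 + pad cs k := by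
  unfold bAcc; rw [List.range_succ, List.foldl_append]; rfl

theorem land31 (n : Nat) (h : n < 32) : n &&& 31 = n := by
  have : n &&& 31 = n % 32 := Nat.and_two_pow_sub_one_eq_mod n 5
  omega

-- cast bridges for the Int bit operations on nonnegative operands
theorem lor_cast (m n : Nat) : Int.lor (m : Int) (n : Int) = ((m ||| n : Nat) : Int) := rfl
theorem land_cast (m n : Nat) : Int.land (m : Int) (n : Int) = ((m &&& n : Nat) : Int) := rfl
theorem shiftLeft_cast (m k : Nat) : Int.shiftLeft (m : Int) k = ((m <<< k : Nat) : Int) := rfl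

-- the symbol table agrees with char_to_symbol's range arithmetic on all 7-bit characters
theorem dom_lt128 (c : Char) (h : pvDomChar c = true) : c.toNat < 128 := by
  unfold pvDomChar at h
  simp only [Bool.or_eq_true, Bool.and_eq_true, decide_eq_true_eq, beq_iff_eq] at h
  omega

set_option maxRecDepth 4000 in
theorem pvSymbol_eq_aux : ∀ t ∈ List.range 128, pvSymbol (Char.ofNat t) = symC (Char.ofNat t) := by
  decide

theorem pvSymbol_eq (c : Char) (h : c.toNat < 128) : pvSymbol c = symC c := by
  have := pvSymbol_eq_aux c.toNat (List.mem_range.mpr h)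
  simpa [Char.ofNat_toNat] using this

-- base-32 digit round trip: the index of BASE32[k] is k
theorem d32_roundtrip : ∀ k ∈ List.range 32,
    (PySem.List.index? pvBASE32 (pvBASE32.getD k '0')).getD 0 = k := by
  decide

-- the padded body list, slot by slot
theorem body_eq (cs : List Char) :
    (cs.take 12 ++ List.replicate 12 '.').take 12
      = (List.range 12).map (fun i => if i < cs.length then cs.getD i '.' else '.') := by
  apply List.ext_getElem
  · simp
  · intro i h1 h2
    simp only [List.getElem_map, List.getElem_range]
    have hi : i < 12 := by simpa using h2
    rw [List.getElem_take]
    by_cases hlen : i < cs.length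
    · rw [List.getElem_append_left (by simp; omega)]
      rw [List.getElem_take, if_pos hlen]
      simp [List.getD_eq_getElem?_getD, List.getElem?_eq_getElem hlen]
    · have : (cs.take 12).length ≤ i := by simp; omega
      rw [List.getElem_append_right this, List.getElem_replicate, if_neg hlen]

-- B's digit value at slot i equals the 5-bit field A packs there
theorem digit_val (cs : List Char) (hdom : ∀ c ∈ cs, pvDomChar c = true) (i : Nat) :
    ((PySem.List.index? pvBASE32
        (pvBASE32.getD (pvSymbol (if i < cs.length then cs.getD i '.' else '.')) '0')).getD 0)
      = pad cs i := by
  set c := (if i < cs.length then cs.getD i '.' else '.') with hc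
  have h128 : c.toNat < 128 := by
    rw [hc]; split_ifs with h
    · have hmem : cs.getD i '.' ∈ cs := by
        rw [List.getD_eq_getElem?_getD, List.getElem?_eq_getElem h]
        exact List.getElem_mem h
      exact dom_lt128 _ (hdom _ hmem)
    · decide
  have hsym : pvSymbol c = pad cs i := by
    rw [pvSymbol_eq c h128, hc]
    unfold pad
    split_ifs with h
    · have : cs.getD i '.' = cs.getD i ' ' := by
        simp [List.getD_eq_getElem?_getD, List.getElem?_eq_getElem h]
      rw [this]
    · decide
  rw [hsym]
  exact d32_roundtrip _ (List.mem_range.mpr (pad_lt cs i))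

-- B's parse fold computes bAcc cs 12
theorem parse_fold (cs : List Char) (hdom : ∀ c ∈ cs, pvDomChar c = true) :
    (((cs.take 12 ++ List.replicate 12 '.').take 12).map (fun c => pvBASE32.getD (pvSymbol c) '0')).foldl
        (fun a c => a * 32 + (((PySem.List.index? pvBASE32 c).getD 0 : Nat) : Int)) 0
      = ((bAcc cs 12 : Nat) : Int) := by
  rw [body_eq, List.map_map, List.foldl_map]
  have hkey : ∀ k, k ≤ 12 → (List.range k).foldl (fun a i => a * 32 + ((pad cs i : Nat) : Int)) 0
      = ((bAcc cs k : Nat) : Int) := by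
    intro k
    induction k with
    | zero => intro _; rfl
    | succ k ih =>
      intro hk
      rw [List.range_succ, List.foldl_append, ih (by omega)]
      simp only [List.foldl_cons, List.foldl_nil]
      rw [bAcc_succ]; push_cast; ring
  refine Eq.trans (PySem.List.foldl_congr_mem _ _ _ _ ?_) (hkey 12 (by omega))
  intro a i _
  simp only [Function.comp_apply]
  rw [digit_val cs hdom i]

-- the key Nat identity for one step of A's loop
theorem or_step (a s j : Nat) (hs : s < 32) (hj : j < 12) :
    (a * 2 ^ (64 - 5 * j)) ||| (s <<< (64 - 5 * (j + 1)))
      = (a * 32 + s) * 2 ^ (64 - 5 * (j + 1)) := by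
  have hm : 64 - 5 * j = (64 - 5 * (j + 1)) + 5 := by omega
  set m := 64 - 5 * (j + 1) with hmdef
  have h1 : a * 2 ^ (m + 5) = a <<< (m + 5) := by rw [Nat.shiftLeft_eq]
  have hb : s <<< m < 2 ^ (m + 5) := by
    rw [Nat.shiftLeft_eq, pow_add]
    calc s * 2 ^ m ≤ 31 * 2 ^ m := by
          exact Nat.mul_le_mul_right _ (by omega)
      _ < 2 ^ m * 2 ^ 5 := by
          have : (0:Nat) < 2 ^ m := Nat.two_pow_pos m
          nlinarith
  have := Nat.shiftLeft_add_eq_or_of_lt hb a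
  rw [hm, h1, ← this, Nat.shiftLeft_eq, Nat.shiftLeft_eq, pow_add]
  ring

-- A's loop, with the invariant name = bAcc · 2^(64-5j), driven to the end
theorem loopA_inv (cs : List Char) (n : Nat) (hn : n = min cs.length 12) :
    ∀ j, j ≤ n →
      stnLoopA cs n j ((bAcc cs j * 2 ^ (64 - 5 * j) : Nat) : Int)
        = ((bAcc cs n * 2 ^ (64 - 5 * n) : Nat) : Int) := by
  intro j hj
  induction hd : n - j generalizing j with
  | zero =>
    have : j = n := by omega
    subst this
    rw [stnLoopA]; simp
  | succ d ih =>
    have hjn : j < n := by omega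
    have hjlen : j < cs.length := by omega
    have hj12 : j < 12 := by omega
    rw [stnLoopA]
    simp only [hjn, if_pos]
    have hsym : char_to_symbol ((cs.getD j ' ').toNat) = ((symC (cs.getD j ' ') : Nat) : Int) :=
      symC_eq _
    have h31 : (31 : Int) = ((31 : Nat) : Int) := rfl
    have hstep :
        Int.lor ((bAcc cs j * 2 ^ (64 - 5 * j) : Nat) : Int)
          (Int.shiftLeft (Int.land (char_to_symbol ((cs.getD j ' ').toNat)) 31) (64 - 5 * (j + 1)))
        = ((bAcc cs (j + 1) * 2 ^ (64 - 5 * (j + 1)) : Nat) : Int) := by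
      rw [hsym, h31, land_cast, land31 _ (symC_lt _), shiftLeft_cast, lor_cast]
      congr 1
      have hpad : pad cs j = symC (cs.getD j ' ') := by unfold pad; rw [if_pos hjlen]
      rw [or_step _ _ _ (symC_lt _) hj12, bAcc_succ, hpad]
    rw [hstep]
    exact ih (j + 1) (by omega) (by omega)

-- tail of bAcc is zero digits past n = min(len,12): pure shifts
theorem bAcc_tail (cs : List Char) (n : Nat) (hn : n = min cs.length 12) :
    ∀ k, n ≤ k → k ≤ 12 → bAcc cs k = bAcc cs n * 32 ^ (k - n) := by
  intro k hk hk12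
  induction k with
  | zero =>
    have : n = 0 := by omega
    subst this; simp
  | succ k ih =>
    by_cases h : n = k + 1
    · subst h; simp
    · have hnk : n ≤ k := by omega
      have hpad : pad cs k = 0 := by
        unfold pad
        rw [if_neg (by omega)]
      rw [bAcc_succ, ih hnk (by omega), hpad]
      have : (k + 1) - n = (k - n) + 1 := by omega
      rw [this, pow_succ]
      ring

-- A's packed 60-bit block equals B's parsed-and-shifted base-32 number
theorem names_eq (cs : List Char) (hdom : ∀ c ∈ cs, pvDomChar c = true) (hlen : cs.length ≤ 13) :
    stnLoopA cs (min cs.length 12) 0 0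
      = Int.shiftLeft
          ((((cs.take 12 ++ List.replicate 12 '.').take 12).map (fun c => pvBASE32.getD (pvSymbol c) '0')).foldl
            (fun a c => a * 32 + (((PySem.List.index? pvBASE32 c).getD 0 : Nat) : Int)) 0) 4 := by
  set n := min cs.length 12 with hn
  have hn12 : n ≤ 12 := by omega
  have hA : stnLoopA cs n 0 0 = ((bAcc cs n * 2 ^ (64 - 5 * n) : Nat) : Int) := by
    have h := loopA_inv cs n hn 0 (by omega)
    simpa [bAcc] using h
  rw [hA, parse_fold cs hdom, shiftLeft_cast]
  congr 1
  rw [bAcc_tail cs n hn 12 hn12 (by omega)]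
  have h32 : (32 : Nat) ^ (12 - n) = 2 ^ (5 * (12 - n)) := by
    rw [show (32:Nat) = 2 ^ 5 from rfl, ← pow_mul]
  rw [Nat.shiftLeft_eq, h32, mul_assoc, ← pow_add]
  congr 2
  omega

-- the 13th character's 4-bit tail agrees
theorem tail_eq (cs : List Char) (hdom : ∀ c ∈ cs, pvDomChar c = true) (hlen : cs.length = 13) :
    char_to_symbol ((cs.getD 12 ' ').toNat) = ((pvSymbol (cs.getD 12 ' ') : Nat) : Int) := by
  have hmem : cs.getD 12 ' ' ∈ cs := by
    have h12 : 12 < cs.length := by omega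
    rw [List.getD_eq_getElem?_getD, List.getElem?_eq_getElem h12]
    exact List.getElem_mem h12
  rw [symC_eq, pvSymbol_eq _ (dom_lt128 _ (hdom _ hmem))]

-- ===== VERDICT (by name: the statement is the Claim_ definition above) =====
theorem string_to_name_spec : Claim_equal_string_to_name := by
  intro s hdom hpre
  have hdom' : ∀ c ∈ s.toList, pvDomChar c = true := by
    intro c hc
    exact List.all_eq_true.mp hdom c hc
  unfold Spec_string_to_name string_to_name string_to_name_alt
  simp only []
  rw [names_eq s.toList hdom' hpre]
  by_cases h13 : s.toList.length = 13
  · rw [if_pos h13, if_pos h13, tail_eq s.toList hdom' h13]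
  · rw [if_neg h13, if_neg h13]
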